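-- pv_equiv track=rewrite | github.com/XyzHuy/-DL-Fine-tuning-coding-model | data/solution/Solution2403.py | minimumTime
-- ===== SOURCE A (Python) =====
-- from typing import List
-- from functools import lru_cache
--
-- def minimumTime(power: List[int]) -> int:
--     n = len(power)
--
--     @lru_cache(None)
--     def dp(mask, gain):
--         if mask == (1 << n) - 1:
--             return 0
--
--         days = float('inf')
--         for i in range(n):
--             if not (mask & (1 << i)):
--                 # Days to defeat the i-th monster
--                 current_days = (power[i] - 1) // gain + 1
--                 # Recursively calculate the days needed for the remaining monsters
--                 days = min(days, current_days + dp(mask | (1 << i), gain + 1))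
--
--         return days
--
--     return dp(0, 1)
-- ===== SOURCE B (Python) =====
-- def minimumTime(power):
--     n = len(power)
--     full = (1 << n) - 1
--     f = [0] * (full + 1)
--     for mask in reversed(range(full)):
--         rem = [i for i in range(n) if not (mask >> i) & 1]
--         gain = n - len(rem) + 1
--         best = None
--         for i in rem:
--             d = (power[i] - 1) // gain + 1 + f[mask | (1 << i)]
--             if best is None or d < best:
--                 best = d
--         f[mask] = best
--     return f[0]
-- ===== Notes on version B (the rewrite author's own statement) =====
-- stated objective: alternative
-- what changed: Replaced the lru_cache-memoized top-down recursion over (mask, gain) by an iterative bottom-up DP table indexed by mask, filled from the full mask downward, with the gain recomputed from the mask's unset bits instead of threaded through recursion.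
import Mathlib
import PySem

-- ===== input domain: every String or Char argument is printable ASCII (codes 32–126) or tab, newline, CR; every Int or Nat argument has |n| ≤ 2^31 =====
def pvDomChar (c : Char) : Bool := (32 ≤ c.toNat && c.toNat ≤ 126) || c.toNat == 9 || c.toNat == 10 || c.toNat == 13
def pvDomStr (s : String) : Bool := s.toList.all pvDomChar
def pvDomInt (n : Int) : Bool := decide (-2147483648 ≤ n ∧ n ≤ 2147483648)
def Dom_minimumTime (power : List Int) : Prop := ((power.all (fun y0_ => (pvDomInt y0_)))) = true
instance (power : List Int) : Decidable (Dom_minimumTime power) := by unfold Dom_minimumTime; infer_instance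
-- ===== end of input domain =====

-- B replaces A's memoized top-down recursion by an iterative bottom-up table over masks; equal return values proved below.

-- ===== PORT A =====
-- Python's float('inf') initial value of `days` is modelled as `none`;
-- min with `none` as +infinity:
def pvOptMin (a b : Option Int) : Option Int :=
  match a, b with
  | none, b => b
  | a, none => a
  | some x, some y => some (min x y)

-- dp(mask, gain) of A.  The @lru_cache memo table is ported as the explicit
-- dictionary threaded through (keyed by the argument pair, exactly as lru_cache
-- keys calls); the extra `fuel` argument is only a totality guard (each
-- recursive call sets one more of the n low bits); it changes no value that the
-- entry point reaches.
def pvDpA (power : List Int) (n : Nat) :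
    Nat → PySem.Dict (Nat × Int) (Option Int) → Nat → Int →
      (Option Int × PySem.Dict (Nat × Int) (Option Int))
  | fuel, cache, mask, gain =>
    match PySem.Dict.get? cache (mask, gain) with
    | some v => (v, cache)
    | none =>
      if mask = 2 ^ n - 1 then (some 0, PySem.Dict.insert cache (mask, gain) (some 0))
      else
        match fuel with
        | 0 => (none, cache)
        | fuel' + 1 =>
          let r := (List.range n).foldl
            (fun (st : Option Int × PySem.Dict (Nat × Int) (Option Int)) (i : Nat) =>
              if mask &&& (1 <<< i) = 0 then
                let rc := pvDpA power n fuel' st.2 (mask ||| (1 <<< i)) (gain + 1)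
                (pvOptMin st.1 (rc.1.map
                  (fun r => PySem.Int.floordiv (PySem.List.pyGetD power (i : Int) 0 - 1) gain + 1 + r)), rc.2)
              else st)
            (none, cache)
          (r.1, PySem.Dict.insert r.2 (mask, gain) r.1)

def minimumTime (power : List Int) : Int :=
  (pvDpA power power.length power.length PySem.Dict.empty 0 1).1.getD 0

-- ===== PORT B =====
-- one iteration of the mask loop of Source B (f[mask] = best over unset bits);
-- the Python list f (O(1) indexing) is ported as an Array
def pvStep (power : List Int) (n : Nat) (f : Array Int) (mask : Nat) : Array Int :=
  let rem := (List.range n).filter (fun i => (mask >>> i) &&& 1 = 0)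
  let gain : Int := (n : Int) - rem.length + 1
  let best := rem.foldl
    (fun (best : Option Int) (i : Nat) =>
      let d := PySem.Int.floordiv (PySem.List.pyGetD power (i : Int) 0 - 1) gain + 1
                 + f.getD (mask ||| (1 <<< i)) 0
      match best with
      | none => some d
      | some b => if d < b then some d else some b)
    (none : Option Int)
  f.set! mask (best.getD 0)   -- Python's `best is None` never survives the loop for mask < full

def minimumTime_alt (power : List Int) : Int :=
  let n := power.length
  let full := 2 ^ n - 1
  let f0 : Array Int := Array.replicate (full + 1) 0
  let f := ((List.range full).reverse).foldl (pvStep power n) f0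
  f.getD 0 0

-- ===== PRECONDITION & SPEC =====
def Spec_minimumTime (power : List Int) (out : Int) : Prop := out = minimumTime_alt power
instance (power : List Int) (out : Int) : Decidable (Spec_minimumTime power out) := by unfold Spec_minimumTime; infer_instance

-- ===== CLAIM (what is proved, stated in full; the proofs are below) =====
def Claim_equal_minimumTime : Prop := ∀ (power : List Int), Dom_minimumTime power → Spec_minimumTime power (minimumTime power)

-- ===== LEMMAS AND PROOFS =====

-- the memo-free recursion A's dp computes (same body, no cache)
def pvDpPure (power : List Int) (n : Nat) : Nat → Nat → Int → Option Int
  | fuel, mask, gain =>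
    if mask = 2 ^ n - 1 then some 0
    else
      match fuel with
      | 0 => none
      | fuel' + 1 =>
        (List.range n).foldl
          (fun (days : Option Int) (i : Nat) =>
            if mask &&& (1 <<< i) = 0 then
              pvOptMin days
                ((pvDpPure power n fuel' (mask ||| (1 <<< i)) (gain + 1)).map
                  (fun r => PySem.Int.floordiv (PySem.List.pyGetD power (i : Int) 0 - 1) gain + 1 + r))
            else days)
          none

-- number of unset low bits (A's open monsters)
def pvCU (mask n : Nat) : Nat := ((List.range n).filter (fun i => mask &&& (1 <<< i) == 0)).length

theorem pvBit_eq_testBit (m i : Nat) : (m &&& (1 <<< i) = 0) ↔ (m.testBit i = false) := by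
  rw [Nat.shiftLeft_eq, one_mul, Nat.and_two_pow]
  rcases h : m.testBit i <;> simp [Nat.pow_eq_zero]

theorem pvBitB_eq_testBit (m i : Nat) : ((m >>> i) &&& 1 = 0) ↔ (m.testBit i = false) := by
  simp [Nat.testBit, Nat.and_one_is_mod]

theorem pvCU_countP (mask n : Nat) : pvCU mask n = (List.range n).countP (fun i => ! mask.testBit i) := by
  unfold pvCU
  rw [← List.countP_eq_length_filter]
  apply List.countP_congr
  intro j _
  simp only [beq_iff_eq, Bool.not_eq_true']
  constructor
  · intro h; exact ((pvBit_eq_testBit mask j).mp (by simpa using h))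
  · intro h; simpa using (pvBit_eq_testBit mask j).mpr h

theorem pvCU_zero_iff (mask n : Nat) (h : mask < 2 ^ n) : pvCU mask n = 0 ↔ mask = 2 ^ n - 1 := by
  rw [pvCU_countP]
  constructor
  · intro h0
    apply Nat.eq_of_testBit_eq
    intro j
    rw [Nat.testBit_two_pow_sub_one]
    by_cases hj : j < n
    · have hall : ∀ i ∈ List.range n, ¬ (! mask.testBit i) = true := by
        simpa [List.countP_eq_zero] using h0
      have := hall j (List.mem_range.mpr hj)
      simp at this
      simp [this, hj]
    · have : mask.testBit j = false :=
        Nat.testBit_eq_false_of_lt (lt_of_lt_of_le h (Nat.pow_le_pow_right (by norm_num) (le_of_not_gt hj)))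
      simp [this, hj]
  · intro hm
    subst hm
    rw [List.countP_eq_zero]
    intro i hi
    simp [Nat.testBit_two_pow_sub_one, List.mem_range.mp hi]

theorem pvCU_zero_forall (mask n : Nat) (h : pvCU mask n = 0) :
    ∀ i ∈ List.range n, ¬ (mask &&& (1 <<< i) = 0) := by
  intro i hi hcontra
  unfold pvCU at h
  rw [List.length_eq_zero_iff] at h
  have hmem : i ∈ (List.range n).filter (fun i => mask &&& (1 <<< i) == 0) := by
    simp [List.mem_filter, hi, hcontra]
  simp [h] at hmem

theorem pvCountP_update (l : List Nat) (p q : Nat → Bool) (i : Nat) :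
    i ∈ l → l.Nodup → p i = true → q i = false → (∀ j ∈ l, j ≠ i → p j = q j) →
    l.countP p = l.countP q + 1 := by
  induction l with
  | nil => intro h; simp at h
  | cons a t ih =>
    intro hmem hnd hpi hqi hoth
    rcases List.nodup_cons.mp hnd with ⟨hna, hndt⟩
    by_cases hai : a = i
    · subst hai
      have hq : t.countP p = t.countP q := by
        apply List.countP_congr
        intro j hj
        rw [hoth j (List.mem_cons_of_mem _ hj) (fun e => hna (e ▸ hj))]
      simp [hpi, hqi, hq]
    · have hmt : i ∈ t := by rcases List.mem_cons.mp hmem with h | h; exact absurd h.symm hai; exact h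
      have := ih hmt hndt hpi hqi (fun j hj hji => hoth j (List.mem_cons_of_mem _ hj) hji)
      have hpa : p a = q a := hoth a List.mem_cons_self hai
      simp [List.countP_cons, hpa, this]
      omega

theorem pvCU_or (mask n i : Nat) (hi : i < n) (hu : mask &&& (1 <<< i) = 0) :
    pvCU (mask ||| (1 <<< i)) n + 1 = pvCU mask n := by
  rw [pvCU_countP, pvCU_countP]
  have hbit : mask.testBit i = false := (pvBit_eq_testBit mask i).mp hu
  have := pvCountP_update (List.range n)
    (fun j => ! mask.testBit j) (fun j => ! (mask ||| (1 <<< i)).testBit j) i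
    (List.mem_range.mpr hi) (List.nodup_range)
    (by simp [hbit])
    (by simp [Nat.testBit_or, Nat.shiftLeft_eq, one_mul])
    (by intro j _ hji
        simp [Nat.testBit_or, Nat.shiftLeft_eq, one_mul, Ne.symm hji])
  omega

theorem pvOr_lt (mask n i : Nat) (hm : mask < 2 ^ n) (hi : i < n) :
    mask ||| (1 <<< i) < 2 ^ n := by
  apply Nat.or_lt_two_pow hm
  rw [Nat.shiftLeft_eq, one_mul]
  exact Nat.pow_lt_pow_right one_lt_two hi

theorem pvFoldl_id (F : Option Int → Nat → Option Int) :
    ∀ (l : List Nat) (acc : Option Int), (∀ d, ∀ i ∈ l, F d i = d) → l.foldl F acc = acc := by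
  intro l
  induction l with
  | nil => intro acc _; rfl
  | cons a t ih =>
    intro acc h
    rw [List.foldl_cons, h acc a List.mem_cons_self]
    exact ih acc (fun d i hi => h d i (List.mem_cons_of_mem _ hi))

theorem pvFoldl_pres (F : Option Int → Nat → Option Int) :
    ∀ (l : List Nat) (acc : Option Int), (∀ d, ∀ i ∈ l, d.isSome → (F d i).isSome) →
      acc.isSome → (l.foldl F acc).isSome := by
  intro l
  induction l with
  | nil => intro acc _ h; exact h
  | cons a t ih =>
    intro acc h hacc
    rw [List.foldl_cons]
    exact ih (F acc a) (fun d i hi => h d i (List.mem_cons_of_mem _ hi))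
      (h acc a List.mem_cons_self hacc)

theorem pvFoldl_some (F : Option Int → Nat → Option Int) :
    ∀ (l : List Nat) (acc : Option Int), (∀ d, ∀ i ∈ l, d.isSome → (F d i).isSome) →
      (∃ i ∈ l, ∀ d, (F d i).isSome) → (l.foldl F acc).isSome := by
  intro l
  induction l with
  | nil => intro acc _ h; rcases h with ⟨i, hi, _⟩; simp at hi
  | cons a t ih =>
    intro acc hpres hex
    rw [List.foldl_cons]
    rcases hex with ⟨i, hi, hsome⟩
    rcases List.mem_cons.mp hi with rfl | hit
    · exact pvFoldl_pres F t (F acc i)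
        (fun d j hj => hpres d j (List.mem_cons_of_mem _ hj)) (hsome acc)
    · exact ih (F acc a) (fun d j hj => hpres d j (List.mem_cons_of_mem _ hj)) ⟨i, hit, hsome⟩

-- fuel is irrelevant once it is at least the number of unset bits
theorem pvDpPure_fuel (power : List Int) (n : Nat) :
    ∀ f1 f2 mask gain, pvCU mask n ≤ f1 → pvCU mask n ≤ f2 →
      pvDpPure power n f1 mask gain = pvDpPure power n f2 mask gain := by
  intro f1
  induction f1 with
  | zero =>
    intro f2 mask gain h1 _
    have hcu : pvCU mask n = 0 := Nat.le_zero.mp h1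
    rw [pvDpPure.eq_def, pvDpPure.eq_def]
    by_cases hfull : mask = 2 ^ n - 1
    · simp [hfull]
    · simp only [hfull, if_false]
      cases f2 with
      | zero => rfl
      | succ f2' =>
        exact (pvFoldl_id _ (List.range n) none
          (fun d i hi => by simp [pvCU_zero_forall mask n hcu i hi])).symm
  | succ f1' ih =>
    intro f2 mask gain h1 h2
    rw [pvDpPure.eq_def, pvDpPure.eq_def]
    by_cases hfull : mask = 2 ^ n - 1
    · simp [hfull]
    · simp only [hfull, if_false]
      by_cases hcu : pvCU mask n = 0
      · cases f2 with
        | zero =>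
          exact pvFoldl_id _ (List.range n) none
            (fun d i hi => by simp [pvCU_zero_forall mask n hcu i hi])
        | succ f2' =>
          exact (pvFoldl_id _ (List.range n) none
            (fun d i hi => by simp [pvCU_zero_forall mask n hcu i hi])).trans
            (pvFoldl_id _ (List.range n) none
            (fun d i hi => by simp [pvCU_zero_forall mask n hcu i hi])).symm
      · have hcu1 : 1 ≤ pvCU mask n := Nat.one_le_iff_ne_zero.mpr hcu
        cases f2 with
        | zero => omega
        | succ f2' =>
          show List.foldl _ none (List.range n) = List.foldl _ none (List.range n)
          apply List.foldl_ext
          intro d i hi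
          by_cases hu : mask &&& (1 <<< i) = 0
          · have hrec := ih f2' (mask ||| (1 <<< i)) (gain + 1)
              (by have := pvCU_or mask n i (List.mem_range.mp hi) hu; omega)
              (by have := pvCU_or mask n i (List.mem_range.mp hi) hu; omega)
            simp [hu, hrec]
          · simp [hu]

theorem pvDpPure_isSome (power : List Int) (n : Nat) :
    ∀ fuel mask gain, mask < 2 ^ n → pvCU mask n ≤ fuel →
      (pvDpPure power n fuel mask gain).isSome := by
  intro fuel
  induction fuel with
  | zero =>
    intro mask gain hm hcu
    have : mask = 2 ^ n - 1 := (pvCU_zero_iff mask n hm).mp (Nat.le_zero.mp hcu)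
    rw [pvDpPure.eq_def]
    simp [this]
  | succ fuel' ih =>
    intro mask gain hm hcu
    rw [pvDpPure.eq_def]
    by_cases hfull : mask = 2 ^ n - 1
    · simp [hfull]
    · simp only [hfull, if_false]
      have hcu1 : pvCU mask n ≠ 0 := fun h => hfull ((pvCU_zero_iff mask n hm).mp h)
      have hne : (List.range n).filter (fun i => mask &&& (1 <<< i) == 0) ≠ [] := by
        intro h
        exact hcu1 (by unfold pvCU; rw [h]; rfl)
      rcases List.exists_mem_of_ne_nil _ hne with ⟨i, hi⟩
      rcases List.mem_filter.mp hi with ⟨hir, hpi⟩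
      show (List.foldl _ none (List.range n)).isSome
      apply pvFoldl_some
      · intro d j hj hd
        by_cases hu : mask &&& (1 <<< j) = 0
        · simp only [hu, if_true]
          rcases Option.isSome_iff_exists.mp hd with ⟨v, rfl⟩
          cases pvDpPure power n fuel' (mask ||| (1 <<< j)) (gain + 1) <;> simp [pvOptMin]
        · simpa [hu] using hd
      · refine ⟨i, hir, ?_⟩
        intro d
        have hu : mask &&& (1 <<< i) = 0 := by simpa using hpi
        have hrec := ih (mask ||| (1 <<< i)) (gain + 1)
          (pvOr_lt mask n i hm (List.mem_range.mp hir))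
          (by have := pvCU_or mask n i (List.mem_range.mp hir) hu; omega)
        rcases Option.isSome_iff_exists.mp hrec with ⟨v, hv⟩
        simp only [hu, if_true, hv]
        cases d <;> simp [pvOptMin]

-- the memo dictionary only ever holds correct dp values
def pvInv (power : List Int) (n : Nat) (cache : PySem.Dict (Nat × Int) (Option Int)) : Prop :=
  ∀ m g v, PySem.Dict.get? cache (m, g) = some v → v = pvDpPure power n (pvCU m n) m g

theorem pvDpPure_full (power : List Int) (n fuel mask : Nat) (gain : Int)
    (h : mask = 2 ^ n - 1) : pvDpPure power n fuel mask gain = some 0 := by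
  rw [pvDpPure.eq_def]
  simp [h]

theorem pvDpA_spec (power : List Int) (n : Nat) :
    ∀ fuel cache mask gain, pvInv power n cache → pvCU mask n ≤ fuel →
      (pvDpA power n fuel cache mask gain).1 = pvDpPure power n fuel mask gain ∧
      pvInv power n (pvDpA power n fuel cache mask gain).2 := by
  intro fuel
  induction fuel with
  | zero =>
    intro cache mask gain hinv hcu
    have hcu0 : pvCU mask n = 0 := Nat.le_zero.mp hcu
    rw [pvDpA.eq_def]
    cases hhit : PySem.Dict.get? cache (mask, gain) with
    | some v =>
      simp only [hhit]
      refine ⟨?_, hinv⟩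
      rw [hinv mask gain v hhit, hcu0]
    | none =>
      simp only [hhit]
      by_cases hfull : mask = 2 ^ n - 1
      · rw [if_pos hfull]
        constructor
        · rw [pvDpPure_full power n 0 mask gain hfull]
        · intro m g v hget
          by_cases hk : (m, g) = (mask, gain)
          · rw [hk, PySem.Dict.get?_insert_self] at hget
            cases hget
            rw [pvDpPure_full power n _ m g (by injection hk with h1 _; omega)]
          · rw [PySem.Dict.get?_insert_of_ne _ _ hk] at hget
            exact hinv m g v hget
      · rw [if_neg hfull]
        refine ⟨?_, hinv⟩
        rw [pvDpPure.eq_def]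
        simp [hfull]
  | succ fuel' ih =>
    intro cache mask gain hinv hcu
    rw [pvDpA.eq_def]
    cases hhit : PySem.Dict.get? cache (mask, gain) with
    | some v =>
      simp only [hhit]
      refine ⟨?_, hinv⟩
      rw [hinv mask gain v hhit]
      exact pvDpPure_fuel power n (pvCU mask n) (fuel' + 1) mask gain le_rfl hcu
    | none =>
      simp only [hhit]
      by_cases hfull : mask = 2 ^ n - 1
      · rw [if_pos hfull]
        constructor
        · rw [pvDpPure_full power n (fuel' + 1) mask gain hfull]
        · intro m g v hget
          by_cases hk : (m, g) = (mask, gain)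
          · rw [hk, PySem.Dict.get?_insert_self] at hget
            cases hget
            rw [pvDpPure_full power n _ m g (by injection hk with h1 _; omega)]
          · rw [PySem.Dict.get?_insert_of_ne _ _ hk] at hget
            exact hinv m g v hget
      · rw [if_neg hfull]
        have hfold : ∀ (l : List Nat), (∀ i ∈ l, i < n) →
            ∀ (acc : Option Int) (cache' : PySem.Dict (Nat × Int) (Option Int)), pvInv power n cache' →
            (List.foldl
              (fun (st : Option Int × PySem.Dict (Nat × Int) (Option Int)) (i : Nat) =>
                if mask &&& (1 <<< i) = 0 then
                  let rc := pvDpA power n fuel' st.2 (mask ||| (1 <<< i)) (gain + 1)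
                  (pvOptMin st.1 (rc.1.map
                    (fun r => PySem.Int.floordiv (PySem.List.pyGetD power (i : Int) 0 - 1) gain + 1 + r)), rc.2)
                else st)
              (acc, cache') l).1
              = List.foldl
                (fun (days : Option Int) (i : Nat) =>
                  if mask &&& (1 <<< i) = 0 then
                    pvOptMin days
                      ((pvDpPure power n fuel' (mask ||| (1 <<< i)) (gain + 1)).map
                        (fun r => PySem.Int.floordiv (PySem.List.pyGetD power (i : Int) 0 - 1) gain + 1 + r))
                  else days)
                acc l ∧
            pvInv power n
              (List.foldl
                (fun (st : Option Int × PySem.Dict (Nat × Int) (Option Int)) (i : Nat) =>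
                  if mask &&& (1 <<< i) = 0 then
                    let rc := pvDpA power n fuel' st.2 (mask ||| (1 <<< i)) (gain + 1)
                    (pvOptMin st.1 (rc.1.map
                      (fun r => PySem.Int.floordiv (PySem.List.pyGetD power (i : Int) 0 - 1) gain + 1 + r)), rc.2)
                  else st)
                (acc, cache') l).2 := by
          intro l
          induction l with
          | nil => intro _ acc cache' hinv'; exact ⟨rfl, hinv'⟩
          | cons a t iht =>
            intro hlt acc cache' hinv'
            rw [List.foldl_cons, List.foldl_cons]
            by_cases hu : mask &&& (1 <<< a) = 0
            · simp only [hu, if_true]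
              have hrec := ih cache' (mask ||| (1 <<< a)) (gain + 1) hinv'
                (by have := pvCU_or mask n a (hlt a List.mem_cons_self) hu; omega)
              rw [hrec.1]
              exact iht (fun i hi => hlt i (List.mem_cons_of_mem _ hi)) _ _ hrec.2
            · simp only [hu, if_false]
              exact iht (fun i hi => hlt i (List.mem_cons_of_mem _ hi)) _ _ hinv'
        have hmain := hfold (List.range n) (fun i hi => List.mem_range.mp hi) none cache hinv
        have hpure : pvDpPure power n (fuel' + 1) mask gain
            = List.foldl
                (fun (days : Option Int) (i : Nat) =>
                  if mask &&& (1 <<< i) = 0 then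
                    pvOptMin days
                      ((pvDpPure power n fuel' (mask ||| (1 <<< i)) (gain + 1)).map
                        (fun r => PySem.Int.floordiv (PySem.List.pyGetD power (i : Int) 0 - 1) gain + 1 + r))
                  else days)
                none (List.range n) := by
          rw [pvDpPure.eq_def]
          simp only [hfull, if_false]
        constructor
        · rw [hmain.1, hpure]
        · intro m g v hget
          by_cases hk : (m, g) = (mask, gain)
          · rw [hk, PySem.Dict.get?_insert_self] at hget
            cases hget
            injection hk with h1 h2
            subst h1
            subst h2
            rw [hmain.1, ← hpure]
            exact pvDpPure_fuel power n (fuel' + 1) (pvCU m n) m g hcu le_rfl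
          · rw [PySem.Dict.get?_insert_of_ne _ _ hk] at hget
            exact hmain.2 m g v hget

-- Array access lemmas for B's table
theorem pvAGetD_set_ne (a : Array Int) (i k : Nat) (v d : Int) (h : i ≠ k) :
    (a.set! i v).getD k d = a.getD k d := by
  have hs : (a.set! i v).size = a.size := Array.size_set! a i v
  unfold Array.getD
  split_ifs with h1 h2
  · exact Array.getElem_setIfInBounds_ne h2 h
  · exfalso; omega
  · exfalso; omega
  · rfl

theorem pvAGetD_set_self (a : Array Int) (i : Nat) (v d : Int) (h : i < a.size) :
    (a.set! i v).getD i d = v := by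
  unfold Array.getD
  split_ifs with h1 <;> simp_all [Array.set!]

theorem pvAGetD_replicate (k i : Nat) (d : Int) (h : i < k) :
    (Array.replicate k (0 : Int)).getD i d = 0 := by
  unfold Array.getD
  split_ifs with h1 <;> simp_all

theorem pvFoldl_guard (F : Option Int → Nat → Option Int) (p : Nat → Prop) [DecidablePred p] :
    ∀ (l : List Nat) (acc : Option Int),
      l.foldl (fun d i => if p i then F d i else d) acc
        = (l.filter (fun i => decide (p i))).foldl F acc := by
  intro l
  induction l with
  | nil => intro acc; rfl
  | cons a t ih =>
    intro acc
    by_cases h : p a <;> simp [List.foldl_cons, h, ih]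

theorem pvFilter_eq (t n : Nat) :
    (List.range n).filter (fun i => decide ((t >>> i) &&& 1 = 0))
      = (List.range n).filter (fun i => t &&& (1 <<< i) == 0) := by
  apply List.filter_congr
  intro i _
  by_cases hu : t &&& (1 <<< i) = 0
  · have h2 := (pvBitB_eq_testBit t i).mpr ((pvBit_eq_testBit t i).mp hu)
    simp [hu, h2]
  · have h2 : ¬ ((t >>> i) &&& 1 = 0) :=
      fun h => hu ((pvBit_eq_testBit t i).mpr ((pvBitB_eq_testBit t i).mp h))
    simp only [Nat.and_one_is_mod] at h2
    simp [hu, h2]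

-- the canonical value B's table must contain
def pvDpV (power : List Int) (n mask : Nat) : Option Int :=
  pvDpPure power n (pvCU mask n) mask ((n : Int) - pvCU mask n + 1)

theorem pvStep_spec (power : List Int) (n t : Nat) (f : Array Int)
    (ht : t < 2 ^ n - 1) (hlen : f.size = 2 ^ n)
    (hf : ∀ k, t < k → k < 2 ^ n → f.getD k 0 = (pvDpV power n k).getD 0) :
    (pvStep power n f t).size = 2 ^ n ∧
    ∀ k, t ≤ k → k < 2 ^ n → (pvStep power n f t).getD k 0 = (pvDpV power n k).getD 0 := by
  have hlt : t < 2 ^ n := lt_of_lt_of_le ht (Nat.sub_le _ _)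
  have hcu0 : pvCU t n ≠ 0 := by
    intro h
    have := (pvCU_zero_iff t n hlt).mp h
    omega
  obtain ⟨c, hc⟩ : ∃ c, pvCU t n = c + 1 := ⟨pvCU t n - 1, by omega⟩
  simp only [pvStep, pvFilter_eq]
  constructor
  · simpa [Array.size_set!] using hlen
  · intro k hk1 hk2
    rcases Nat.lt_or_ge t k with hkt | hkt
    · rw [pvAGetD_set_ne _ _ _ _ _ (Nat.ne_of_lt hkt)]
      exact hf k hkt hk2
    · have hkt' : k = t := le_antisymm (by omega) hk1
      subst hkt'
      rw [pvAGetD_set_self _ _ _ _ (by omega : k < f.size)]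
      have hL : (List.filter (fun i => k &&& 1 <<< i == 0) (List.range n)).length = pvCU k n := rfl
      rw [hL]
      have hrem : (List.range n).filter (fun i => decide (k &&& (1 <<< i) = 0))
          = List.filter (fun i => k &&& 1 <<< i == 0) (List.range n) := by
        apply List.filter_congr
        intro i _
        by_cases hu : k &&& 1 <<< i = 0 <;> simp [hu]
      have hkey : (pvDpV power n k) =
          (List.foldl
            (fun (best : Option Int) (i : Nat) =>
              match best with
              | none =>
                some (PySem.Int.floordiv (PySem.List.pyGetD power (↑i) 0 - 1)
                        ((n : Int) - (pvCU k n : Int) + 1) + 1 +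
                      f.getD (k ||| 1 <<< i) 0)
              | some b =>
                if PySem.Int.floordiv (PySem.List.pyGetD power (↑i) 0 - 1)
                      ((n : Int) - (pvCU k n : Int) + 1) + 1 +
                      f.getD (k ||| 1 <<< i) 0 < b then
                  some (PySem.Int.floordiv (PySem.List.pyGetD power (↑i) 0 - 1)
                        ((n : Int) - (pvCU k n : Int) + 1) + 1 +
                      f.getD (k ||| 1 <<< i) 0)
                else some b)
            (none : Option Int)
            (List.filter (fun i => k &&& 1 <<< i == 0) (List.range n))) := by
        rw [pvDpV, pvDpPure.eq_def]
        simp only [show ¬ (k = 2 ^ n - 1) by omega, if_false]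
        rw [hc]
        show List.foldl _ none (List.range n) = _
        rw [pvFoldl_guard _ (fun i => k &&& (1 <<< i) = 0), hrem]
        apply List.foldl_ext
        intro d i hi
        rcases List.mem_filter.mp hi with ⟨hir, hpi⟩
        have hin : i < n := List.mem_range.mp hir
        have hu : k &&& (1 <<< i) = 0 := by simpa using hpi
        have hor_lt : k ||| (1 <<< i) < 2 ^ n := pvOr_lt k n i hlt hin
        have hor_gt : k < k ||| (1 <<< i) := by
          apply Nat.lt_of_le_of_ne Nat.left_le_or
          intro he
          have hb1 : (k ||| 1 <<< i).testBit i = true := by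
            simp [Nat.testBit_or, Nat.shiftLeft_eq, one_mul]
          rw [← he, (pvBit_eq_testBit k i).mp hu] at hb1
          exact Bool.false_ne_true hb1
        have hcor : pvCU (k ||| (1 <<< i)) n = c := by
          have := pvCU_or k n i hin hu
          omega
        have hfv := hf (k ||| (1 <<< i)) hor_gt hor_lt
        have hsome := pvDpPure_isSome power n (pvCU (k ||| (1 <<< i)) n) (k ||| (1 <<< i))
          ((n : Int) - (pvCU (k ||| (1 <<< i)) n : Int) + 1) hor_lt le_rfl
        rcases Option.isSome_iff_exists.mp hsome with ⟨v, hv⟩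
        have hvv : pvDpV power n (k ||| (1 <<< i)) = some v := hv
        have hrecall : pvDpPure power n c (k ||| (1 <<< i))
            ((n : Int) - ((c + 1 : Nat) : Int) + 1 + 1) = some v := by
          rw [← hvv, pvDpV, hcor]
          congr 1
          push_cast
          ring
        have hfd : f.getD (k ||| 1 <<< i) 0 = v := by
          rw [hfv, hvv]
          rfl
        rw [hrecall, hfd]
        cases d with
        | none => simp [pvOptMin]
        | some b =>
          simp only [pvOptMin, Option.map_some]
          rw [min_def]
          split_ifs with h1 h2
          all_goals first | rfl | (exfalso; omega)
      rw [← hkey]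

theorem pvLoop_spec (power : List Int) (n : Nat) :
    ∀ t (f : Array Int), t ≤ 2 ^ n - 1 → f.size = 2 ^ n →
      (∀ k, t ≤ k → k < 2 ^ n → f.getD k 0 = (pvDpV power n k).getD 0) →
      ∀ k, k < 2 ^ n →
        (((List.range t).reverse).foldl (pvStep power n) f).getD k 0 = (pvDpV power n k).getD 0 := by
  intro t
  induction t with
  | zero =>
    intro f _ _ hf k hk
    exact hf k (Nat.zero_le k) hk
  | succ t ih =>
    intro f hle hlen hf k hk
    rw [List.range_succ, List.reverse_append, List.reverse_singleton, List.singleton_append,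
      List.foldl_cons]
    have hstep := pvStep_spec power n t f (by omega) hlen
      (fun k hk1 hk2 => hf k (by omega) hk2)
    exact ih (pvStep power n f t) (by omega) hstep.1 hstep.2 k hk

-- ===== VERDICT (by name: the statement is the Claim_ definition above) =====
theorem minimumTime_spec : Claim_equal_minimumTime := by
  unfold Claim_equal_minimumTime Spec_minimumTime
  intro power _
  unfold minimumTime minimumTime_alt
  simp only []
  have hpow : 1 ≤ 2 ^ power.length := Nat.one_le_two_pow
  have hcu0 : pvCU 0 power.length = power.length := by
    unfold pvCU
    simp [Nat.zero_and]
  have hfull : pvDpV power power.length (2 ^ power.length - 1) = some 0 := by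
    rw [pvDpV, pvDpPure.eq_def]
    simp
  have hloop := pvLoop_spec power power.length (2 ^ power.length - 1)
    (Array.replicate (2 ^ power.length - 1 + 1) 0)
    le_rfl
    (by simp; omega)
    (by intro k hk1 hk2
        have hke : k = 2 ^ power.length - 1 := by omega
        subst hke
        rw [hfull, pvAGetD_replicate _ _ _ (by omega)]
        rfl)
    0 (by omega)
  have hmemo := pvDpA_spec power power.length power.length PySem.Dict.empty 0 1
    (by intro m g v hget; rw [PySem.Dict.get?_empty] at hget; cases hget)
    (by rw [hcu0])
  rw [hmemo.1, hloop, pvDpV, hcu0]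
  congr 2
  ring
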